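-- pv_equiv track=rewrite | github.com/S-Christensen/cartographersStudy | spring/midgameEvaluation.py | sentinel_progress
-- ===== SOURCE A (Python) =====
-- def sentinel_progress(grid):
--     rows, cols = len(grid), len(grid[0])
--     count = 0
--
--     for r in range(rows):
--         for c in range(cols):
--             if grid[r][c] == "Forest":
--                 if r == 0 or r == rows - 1 or c == 0 or c == cols - 1:
--                     count += 1
--
--     return count
-- ===== SOURCE B (Python) =====
-- def sentinel_progress(grid):
--     rows, cols = len(grid), len(grid[0])
--     count = grid[0][:cols].count("Forest")
--     if rows > 1:
--         count += grid[-1][:cols].count("Forest")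
--     for r in range(1, rows - 1):
--         if cols > 0 and grid[r][0] == "Forest":
--             count += 1
--         if cols > 1 and grid[r][cols - 1] == "Forest":
--             count += 1
--     return count
-- ===== Notes on version B (the rewrite author's own statement) =====
-- stated objective: faster
-- what changed: Replaces the single nested scan over all rows*cols cells with an OR border test by per-edge counting: count 'Forest' in the top row (and the bottom row when rows>1) with list.count, then one loop over interior rows adding the left cell and (when cols>1) the right cell.
import Mathlib
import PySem

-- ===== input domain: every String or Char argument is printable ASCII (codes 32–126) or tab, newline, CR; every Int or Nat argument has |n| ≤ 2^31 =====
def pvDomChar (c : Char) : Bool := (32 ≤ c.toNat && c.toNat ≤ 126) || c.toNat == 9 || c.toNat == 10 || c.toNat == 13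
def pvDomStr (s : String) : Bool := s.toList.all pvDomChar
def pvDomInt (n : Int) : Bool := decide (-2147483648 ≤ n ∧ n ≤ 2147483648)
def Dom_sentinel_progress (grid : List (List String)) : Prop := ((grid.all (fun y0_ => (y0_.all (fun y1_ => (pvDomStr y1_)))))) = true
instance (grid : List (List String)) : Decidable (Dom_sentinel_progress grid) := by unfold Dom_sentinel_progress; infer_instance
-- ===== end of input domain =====

-- B counts the border by edges (top/bottom row counts plus left/right cells of interior rows) instead of A's scan of every cell; same value, different decomposition.

-- ===== PORT A =====
def sentinel_progress (grid : List (List String)) : Int :=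
  let rows : Int := grid.length
  let cols : Int := (PySem.List.pyGetD grid 0 []).length
  (PySem.List.pyRange 0 rows 1).foldl (fun count r =>
    (PySem.List.pyRange 0 cols 1).foldl (fun count c =>
      if PySem.List.pyGetD (PySem.List.pyGetD grid r []) c "" = "Forest" then
        (if r = 0 ∨ r = rows - 1 ∨ c = 0 ∨ c = cols - 1 then count + 1 else count)
      else count) count) 0

-- ===== PORT B =====
def sentinel_progress_alt (grid : List (List String)) : Int :=
  let rows : Int := grid.length
  let cols : Int := (PySem.List.pyGetD grid 0 []).length
  let count0 : Int := ((PySem.List.slice (PySem.List.pyGetD grid 0 []) none (some cols)).count "Forest" : Int)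
  let count1 : Int :=
    if rows > 1 then
      count0 + ((PySem.List.slice (PySem.List.pyGetD grid (-1) []) none (some cols)).count "Forest" : Int)
    else count0
  (PySem.List.pyRange 1 (rows - 1) 1).foldl (fun count r =>
    let count := if cols > 0 ∧ PySem.List.pyGetD (PySem.List.pyGetD grid r []) 0 "" = "Forest" then count + 1 else count
    if cols > 1 ∧ PySem.List.pyGetD (PySem.List.pyGetD grid r []) (cols - 1) "" = "Forest" then count + 1 else count) count1

-- ===== PRECONDITION & SPEC =====
-- Pre_: exactly the inputs on which the Python A returns normally (A raises IndexError on
-- the empty grid and whenever some row is shorter than the first row).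
def Pre_sentinel_progress (grid : List (List String)) : Prop :=
  grid ≠ [] ∧ ∀ row ∈ grid, (grid.headD []).length ≤ row.length
instance (grid : List (List String)) : Decidable (Pre_sentinel_progress grid) := by unfold Pre_sentinel_progress; infer_instance

def pvWitness_sentinel_progress : List (List String) :=
  [["Forest", "X", "Forest"], ["X", "X", "Forest"], ["Forest", "X", "X"]]

def Spec_sentinel_progress (grid : List (List String)) (out : Int) : Prop := out = sentinel_progress_alt grid
instance (grid : List (List String)) (out : Int) : Decidable (Spec_sentinel_progress grid out) := by unfold Spec_sentinel_progress; infer_instance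

-- ===== CLAIM (what is proved, stated in full; the proofs are below) =====
def Claim_equal_sentinel_progress : Prop := ∀ (grid : List (List String)), Dom_sentinel_progress grid → Pre_sentinel_progress grid → Spec_sentinel_progress grid (sentinel_progress grid)

-- ===== LEMMAS AND PROOFS =====

-- A's inner loop over the columns, written as a sum of 0/1 indicators.
theorem pvInnerA (row : List String) (rows cols r init : Int) :
    (PySem.List.pyRange 0 cols 1).foldl (fun count c =>
      if PySem.List.pyGetD row c "" = "Forest" then
        (if r = 0 ∨ r = rows - 1 ∨ c = 0 ∨ c = cols - 1 then count + 1 else count)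
      else count) init
    = init + ((PySem.List.pyRange 0 cols 1).map (fun c =>
        if PySem.List.pyGetD row c "" = "Forest" ∧ (r = 0 ∨ r = rows - 1 ∨ c = 0 ∨ c = cols - 1)
        then (1:Int) else 0)).sum := by
  have h : (fun (count c : Int) =>
      if PySem.List.pyGetD row c "" = "Forest" then
        (if r = 0 ∨ r = rows - 1 ∨ c = 0 ∨ c = cols - 1 then count + 1 else count)
      else count)
      = fun count c => count +
        (if PySem.List.pyGetD row c "" = "Forest" ∧ (r = 0 ∨ r = rows - 1 ∨ c = 0 ∨ c = cols - 1)
         then (1:Int) else 0) := by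
    funext count c
    split_ifs <;> first | omega | tauto
  rw [h, PySem.List.foldl_add]

-- A as a double sum of 0/1 indicators over row and column indices.
theorem pvA_sum (grid : List (List String)) :
    sentinel_progress grid
    = ((PySem.List.pyRange 0 (grid.length:Int) 1).map (fun r =>
        ((PySem.List.pyRange 0 ((PySem.List.pyGetD grid 0 []).length:Int) 1).map (fun c =>
          if PySem.List.pyGetD (PySem.List.pyGetD grid r []) c "" = "Forest" ∧
             (r = 0 ∨ r = (grid.length:Int) - 1 ∨ c = 0 ∨ c = ((PySem.List.pyGetD grid 0 []).length:Int) - 1)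
          then (1:Int) else 0)).sum)).sum := by
  simp only [sentinel_progress]
  have h : (fun (count r : Int) =>
      (PySem.List.pyRange 0 ((PySem.List.pyGetD grid 0 []).length:Int) 1).foldl (fun count c =>
        if PySem.List.pyGetD (PySem.List.pyGetD grid r []) c "" = "Forest" then
          (if r = 0 ∨ r = (grid.length:Int) - 1 ∨ c = 0 ∨ c = ((PySem.List.pyGetD grid 0 []).length:Int) - 1 then count + 1 else count)
        else count) count)
      = fun count r => count +
        ((PySem.List.pyRange 0 ((PySem.List.pyGetD grid 0 []).length:Int) 1).map (fun c =>
          if PySem.List.pyGetD (PySem.List.pyGetD grid r []) c "" = "Forest" ∧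
             (r = 0 ∨ r = (grid.length:Int) - 1 ∨ c = 0 ∨ c = ((PySem.List.pyGetD grid 0 []).length:Int) - 1)
          then (1:Int) else 0)).sum := by
    funext count r
    exact pvInnerA _ _ _ _ _
  rw [h, PySem.List.foldl_add, zero_add]

-- B with its interior-row loop written as a sum of per-row edge indicators.
theorem pvB_sum (grid : List (List String)) :
    sentinel_progress_alt grid
    = (if (grid.length:Int) > 1 then
        ((PySem.List.slice (PySem.List.pyGetD grid 0 []) none (some ((PySem.List.pyGetD grid 0 []).length:Int))).count "Forest" : Int)
        + ((PySem.List.slice (PySem.List.pyGetD grid (-1) []) none (some ((PySem.List.pyGetD grid 0 []).length:Int))).count "Forest" : Int)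
      else ((PySem.List.slice (PySem.List.pyGetD grid 0 []) none (some ((PySem.List.pyGetD grid 0 []).length:Int))).count "Forest" : Int))
      + ((PySem.List.pyRange 1 ((grid.length:Int) - 1) 1).map (fun r =>
          (if ((PySem.List.pyGetD grid 0 []).length:Int) > 0 ∧ PySem.List.pyGetD (PySem.List.pyGetD grid r []) 0 "" = "Forest" then (1:Int) else 0)
          + (if ((PySem.List.pyGetD grid 0 []).length:Int) > 1 ∧ PySem.List.pyGetD (PySem.List.pyGetD grid r []) (((PySem.List.pyGetD grid 0 []).length:Int) - 1) "" = "Forest" then (1:Int) else 0))).sum := by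
  simp only [sentinel_progress_alt]
  have h : (fun (count r : Int) =>
      let count := if ((PySem.List.pyGetD grid 0 []).length:Int) > 0 ∧ PySem.List.pyGetD (PySem.List.pyGetD grid r []) 0 "" = "Forest" then count + 1 else count
      if ((PySem.List.pyGetD grid 0 []).length:Int) > 1 ∧ PySem.List.pyGetD (PySem.List.pyGetD grid r []) (((PySem.List.pyGetD grid 0 []).length:Int) - 1) "" = "Forest" then count + 1 else count)
      = fun count r => count +
        ((if ((PySem.List.pyGetD grid 0 []).length:Int) > 0 ∧ PySem.List.pyGetD (PySem.List.pyGetD grid r []) 0 "" = "Forest" then (1:Int) else 0)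
         + (if ((PySem.List.pyGetD grid 0 []).length:Int) > 1 ∧ PySem.List.pyGetD (PySem.List.pyGetD grid r []) (((PySem.List.pyGetD grid 0 []).length:Int) - 1) "" = "Forest" then (1:Int) else 0)) := by
    funext count r
    simp only []
    split_ifs <;> omega
  rw [h, PySem.List.foldl_add]

-- Summing the 'Forest' indicator over all column indices counts 'Forest' in the first cols cells.
theorem pvSumFull (row : List String) (cols : Nat) :
    ((PySem.List.pyRange 0 (cols:Int) 1).map (fun c =>
      if PySem.List.pyGetD row c "" = "Forest" then (1:Int) else 0)).sum
    = ((row.take cols).count "Forest" : Int) := by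
  induction cols with
  | zero => simp [PySem.List.pyRange_one_eq_nil]
  | succ n ih =>
    have hc : ((n+1:Nat):Int) = (n:Int) + 1 := by push_cast; ring
    rw [hc, PySem.List.pyRange_one_succ_right (by positivity)]
    simp only [List.map_append, List.sum_append, ih, List.map_cons, List.map_nil,
      List.sum_cons, List.sum_nil, List.take_add_one]
    rw [List.count_append]
    rcases hn : row[n]? with _ | x
    · simp [PySem.List.pyGetD_natCast, List.getD_eq_getElem?_getD, hn]
    · simp [PySem.List.pyGetD_natCast, List.getD_eq_getElem?_getD, hn, List.count_singleton]

-- For an interior row only the two end columns can contribute.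
theorem pvSumEdges (row : List String) (cols : Nat) :
    ((PySem.List.pyRange 0 (cols:Int) 1).map (fun c =>
      if PySem.List.pyGetD row c "" = "Forest" ∧ (c = 0 ∨ c = (cols:Int) - 1)
      then (1:Int) else 0)).sum
    = (if (cols:Int) > 0 ∧ PySem.List.pyGetD row 0 "" = "Forest" then (1:Int) else 0)
      + (if (cols:Int) > 1 ∧ PySem.List.pyGetD row ((cols:Int) - 1) "" = "Forest" then (1:Int) else 0) := by
  match cols with
  | 0 => simp [PySem.List.pyRange_one_eq_nil]
  | 1 =>
    have h1 : ((1:Nat):Int) = 0 + 1 := by norm_num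
    rw [h1, PySem.List.pyRange_one_singleton]
    norm_num
  | (n+2) =>
    have hc : ((n+2:Nat):Int) = (n:Int) + 2 := by push_cast; ring
    rw [hc, PySem.List.pyRange_one_cons (by omega),
      show (n:Int) + 2 = ((n:Int) + 1) + 1 by ring,
      PySem.List.pyRange_one_succ_right (by omega)]
    simp only [List.map_cons, List.sum_cons, List.map_append, List.sum_append,
      List.map_nil, List.sum_nil]
    have hmid : ((PySem.List.pyRange (0+1) ((n:Int)+1) 1).map (fun c =>
        if PySem.List.pyGetD row c "" = "Forest" ∧ (c = 0 ∨ c = ((n:Int) + 1 + 1) - 1)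
        then (1:Int) else 0)).sum = 0 := by
      apply List.sum_eq_zero
      intro x hx
      obtain ⟨c, hc2, rfl⟩ := List.mem_map.mp hx
      have := PySem.List.mem_pyRange_one.mp hc2
      rw [if_neg]
      rintro ⟨-, h0 | h1⟩ <;> omega
    rw [hmid]
    have hlast : ((n:Int) + 1 = 0 ∨ (n:Int) + 1 = ((n:Int) + 1 + 1) - 1) := Or.inr (by ring)
    simp only [hlast, and_true]
    have g0 : ((n:Int) + 2 > 0) := by omega
    have g1 : ((n:Int) + 2 > 1) := by omega
    by_cases ha : PySem.List.pyGetD row 0 "" = "Forest" <;>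
      by_cases hb : PySem.List.pyGetD row ((n:Int)+1) "" = "Forest" <;>
        simp [ha, hb, show ((n:Int)+1+1)-1 = (n:Int)+1 by ring] <;> omega

-- grid[rows-1] is grid[-1] on a non-empty grid.
theorem pvLast (grid : List (List String)) (hne : grid ≠ []) :
    PySem.List.pyGetD grid ((grid.length:Int) - 1) [] = PySem.List.pyGetD grid (-1) [] := by
  have hpos : 0 < grid.length := List.length_pos_of_ne_nil hne
  rw [PySem.List.pyGetD_neg_one grid [] hne]
  have h1 : (grid.length:Int) - 1 = ((grid.length - 1 : Nat) : Int) := by omega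
  rw [h1, PySem.List.pyGetD_natCast, List.getLast_eq_getElem]
  exact List.getD_eq_getElem _ _ (by omega)

theorem pvMain (grid : List (List String)) (hne : grid ≠ []) :
    sentinel_progress grid = sentinel_progress_alt grid := by
  rw [pvA_sum, pvB_sum]
  have hpos : 0 < grid.length := List.length_pos_of_ne_nil hne
  rcases Nat.lt_or_ge grid.length 2 with h2 | h2
  · -- exactly one row: the top row is the whole border, B's bottom/interior parts are empty
    have h1 : grid.length = 1 := by omega
    simp only [h1, Nat.cast_one]
    rw [show (1:Int) - 1 = 0 by ring,
      show PySem.List.pyRange 0 1 1 = [0] from by decide,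
      show PySem.List.pyRange 1 0 1 = [] from by decide]
    simp only [List.map_cons, List.map_nil, List.sum_cons, List.sum_nil, add_zero]
    rw [if_neg (by norm_num : ¬ ((1:Int) > 1))]
    simp only [true_or, and_true]
    rw [pvSumFull, PySem.List.slice_to_natCast]
  · -- at least two rows: split the row range into top row, interior rows, bottom row
    have hgt : ((grid.length:Int)) > 1 := by exact_mod_cast h2
    rw [if_pos hgt]
    have hout : PySem.List.pyRange 0 (grid.length:Int) 1
        = 0 :: (PySem.List.pyRange 1 ((grid.length:Int) - 1) 1 ++ [(grid.length:Int) - 1]) := by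
      rw [PySem.List.pyRange_one_cons (by omega : (0:Int) < (grid.length:Int))]
      norm_num
      conv_lhs => rw [show (grid.length:Int) = ((grid.length:Int) - 1) + 1 by ring]
      rw [PySem.List.pyRange_one_succ_right (by omega)]
    rw [hout]
    simp only [List.map_cons, List.sum_cons, List.map_append, List.sum_append,
      List.map_nil, List.sum_nil, add_zero]
    simp only [true_or, or_true, and_true]
    rw [pvSumFull, pvSumFull, pvLast grid hne, PySem.List.slice_to_natCast,
      PySem.List.slice_to_natCast]
    have hmid : ((PySem.List.pyRange 1 ((grid.length:Int) - 1) 1).map (fun r =>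
        ((PySem.List.pyRange 0 ((PySem.List.pyGetD grid 0 []).length:Int) 1).map (fun c =>
          if PySem.List.pyGetD (PySem.List.pyGetD grid r []) c "" = "Forest" ∧
             (r = 0 ∨ r = (grid.length:Int) - 1 ∨ c = 0 ∨ c = ((PySem.List.pyGetD grid 0 []).length:Int) - 1)
          then (1:Int) else 0)).sum))
      = ((PySem.List.pyRange 1 ((grid.length:Int) - 1) 1).map (fun r =>
          (if ((PySem.List.pyGetD grid 0 []).length:Int) > 0 ∧ PySem.List.pyGetD (PySem.List.pyGetD grid r []) 0 "" = "Forest" then (1:Int) else 0)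
          + (if ((PySem.List.pyGetD grid 0 []).length:Int) > 1 ∧ PySem.List.pyGetD (PySem.List.pyGetD grid r []) (((PySem.List.pyGetD grid 0 []).length:Int) - 1) "" = "Forest" then (1:Int) else 0))) := by
      apply List.map_congr_left
      intro r hr
      have hrr := PySem.List.mem_pyRange_one.mp hr
      have hr0 : ¬ (r = 0) := by omega
      have hr1 : ¬ (r = (grid.length:Int) - 1) := by omega
      have hcond : ∀ c : Int,
          ((if PySem.List.pyGetD (PySem.List.pyGetD grid r []) c "" = "Forest" ∧
             (r = 0 ∨ r = (grid.length:Int) - 1 ∨ c = 0 ∨ c = ((PySem.List.pyGetD grid 0 []).length:Int) - 1)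
          then (1:Int) else 0))
          = (if PySem.List.pyGetD (PySem.List.pyGetD grid r []) c "" = "Forest" ∧
             (c = 0 ∨ c = ((PySem.List.pyGetD grid 0 []).length:Int) - 1)
          then (1:Int) else 0) := by
        intro c
        simp [hr0, hr1]
      simp only [hcond]
      exact pvSumEdges _ _
    rw [hmid]
    ring

-- ===== VERDICT (by name: the statement is the Claim_ definition above) =====
theorem sentinel_progress_spec : Claim_equal_sentinel_progress := by
  intro grid _ hpre
  exact pvMain grid hpre.1
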